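-- pv_equiv track=rewrite | github.com/codejacktsu/blockusAI | moves.py | gen_edge_diag
-- ===== SOURCE A (Python) =====
-- def gen_edge_diag(blocks):
--     edge = set()
--     diag = set()
--     for coord in blocks:
--         y, x = coord[0], coord[1]
--         tl, top, tr = (y-1, x-1), (y-1, x), (y-1, x+1)
--         left, right = (y, x-1), (y, x+1)
--         bl, bot, br = (y+1, x-1), (y+1, x), (y+1, x+1)
--         tmp_edge = [top, left, right, bot]
--         tmp_diag = [tl, tr, bl, br]
--         for pt in tmp_edge:
--             if pt in blocks:
--                 continue
--             elif 0 <= pt[0] <= 13 and 0 <= pt[1] <= 13: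
--                 edge.add(pt)
--                 diag.discard(pt)
--         for pt in tmp_diag:
--             if pt in blocks or pt in edge:
--                 continue
--             elif 0 <= pt[0] <= 13 and 0 <= pt[1] <= 13:
--                 diag.add(pt)
--     return edge, diag
-- ===== SOURCE B (Python) =====
-- def gen_edge_diag(blocks):
--     # Pass 1: the full edge set (in-bounds orthogonal neighbors that are not blocks).
--     edge = set()
--     for coord in blocks:
--         y, x = coord[0], coord[1]
--         for pt in ((y - 1, x), (y, x - 1), (y, x + 1), (y + 1, x)):
--             if pt not in blocks and 0 <= pt[0] <= 13 and 0 <= pt[1] <= 13: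
--                 edge.add(pt)
--     # Pass 2: diagonals filtered against the now-complete edge set (no discard needed).
--     diag = set()
--     for coord in blocks:
--         y, x = coord[0], coord[1]
--         for pt in ((y - 1, x - 1), (y - 1, x + 1), (y + 1, x - 1), (y + 1, x + 1)):
--             if pt not in blocks and pt not in edge and 0 <= pt[0] <= 13 and 0 <= pt[1] <= 13:
--                 diag.add(pt)
--     return edge, diag
-- ===== Notes on version B (the rewrite author's own statement) =====
-- stated objective: simpler
-- what changed: Replaces A's single interleaved loop that maintains diag with discard/partial-edge checks by two independent passes: build the complete edge set first, then collect diagonals filtered against it, with no diag.discard at all.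
import Mathlib
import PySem

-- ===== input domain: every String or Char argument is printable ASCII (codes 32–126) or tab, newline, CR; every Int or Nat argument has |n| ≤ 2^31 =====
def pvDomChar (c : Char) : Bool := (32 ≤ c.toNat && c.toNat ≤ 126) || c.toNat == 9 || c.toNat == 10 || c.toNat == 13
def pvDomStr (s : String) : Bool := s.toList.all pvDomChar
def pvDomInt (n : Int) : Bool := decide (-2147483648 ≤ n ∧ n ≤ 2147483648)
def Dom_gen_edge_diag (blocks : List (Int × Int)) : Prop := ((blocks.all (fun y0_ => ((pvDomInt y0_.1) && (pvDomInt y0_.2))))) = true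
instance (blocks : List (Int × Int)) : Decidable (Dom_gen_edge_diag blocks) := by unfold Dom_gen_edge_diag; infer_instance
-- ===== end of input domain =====

-- B replaces A's interleaved edge/diag bookkeeping (with diag.discard) by two independent passes:
-- the edge set is built completely first, then diagonals are filtered against it; objective: simpler.

-- shared helpers: the board-bounds test 0 <= pt[0] <= 13 and 0 <= pt[1] <= 13 and the two neighbour lists
def pvInb (pt : Int × Int) : Bool :=
  decide (0 ≤ pt.1) && decide (pt.1 ≤ 13) && decide (0 ≤ pt.2) && decide (pt.2 ≤ 13)

def pvOrth (c : Int × Int) : List (Int × Int) :=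
  [(c.1 - 1, c.2), (c.1, c.2 - 1), (c.1, c.2 + 1), (c.1 + 1, c.2)]   -- [top, left, right, bot]

def pvDiag (c : Int × Int) : List (Int × Int) :=
  [(c.1 - 1, c.2 - 1), (c.1 - 1, c.2 + 1), (c.1 + 1, c.2 - 1), (c.1 + 1, c.2 + 1)]   -- [tl, tr, bl, br]

-- ===== PORT A =====
-- the body of A's `for coord in blocks` loop, on the pair state (edge, diag)
def pvAStep (blocks : List (Int × Int))
    (st : PySem.Set (Int × Int) × PySem.Set (Int × Int)) (coord : Int × Int) :
    PySem.Set (Int × Int) × PySem.Set (Int × Int) :=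
  let st1 := (pvOrth coord).foldl
    (fun (st : PySem.Set (Int × Int) × PySem.Set (Int × Int)) pt =>
      if blocks.contains pt then st
      else if pvInb pt then (PySem.Set.add st.1 pt, PySem.Set.discard st.2 pt)
      else st) st
  let d2 := (pvDiag coord).foldl
    (fun (d : PySem.Set (Int × Int)) pt =>
      if blocks.contains pt || st1.1.contains pt then d
      else if pvInb pt then PySem.Set.add d pt
      else d) st1.2
  (st1.1, d2)

def gen_edge_diag (blocks : List (Int × Int)) : (List (Int × Int)) × (List (Int × Int)) :=
  blocks.foldl (pvAStep blocks) (PySem.Set.empty, PySem.Set.empty)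

-- ===== PORT B =====
-- B pass 1: collect in-bounds orthogonal neighbours that are not blocks
def pvBEdgeStep (blocks : List (Int × Int)) (e : PySem.Set (Int × Int)) (coord : Int × Int) :
    PySem.Set (Int × Int) :=
  (pvOrth coord).foldl
    (fun e pt => if !blocks.contains pt && pvInb pt then PySem.Set.add e pt else e) e

-- B pass 2: collect in-bounds diagonal neighbours that are neither blocks nor in the complete edge set
def pvBDiagStep (blocks : List (Int × Int)) (edge : PySem.Set (Int × Int))
    (d : PySem.Set (Int × Int)) (coord : Int × Int) : PySem.Set (Int × Int) :=
  (pvDiag coord).foldl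
    (fun d pt =>
      if !blocks.contains pt && (!edge.contains pt && pvInb pt) then PySem.Set.add d pt else d) d

def gen_edge_diag_alt (blocks : List (Int × Int)) : (List (Int × Int)) × (List (Int × Int)) :=
  let edge := blocks.foldl (pvBEdgeStep blocks) PySem.Set.empty
  let diag := blocks.foldl (pvBDiagStep blocks edge) PySem.Set.empty
  (edge, diag)

-- ===== PRECONDITION & SPEC =====
def Spec_gen_edge_diag (blocks : List (Int × Int)) (out : (List (Int × Int)) × (List (Int × Int))) : Prop := out = gen_edge_diag_alt blocks
instance (blocks : List (Int × Int)) (out : (List (Int × Int)) × (List (Int × Int))) : Decidable (Spec_gen_edge_diag blocks out) := by unfold Spec_gen_edge_diag; infer_instance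

-- ===== CLAIM (what is proved, stated in full; the proofs are below) =====
def Claim_equal_gen_edge_diag : Prop := ∀ (blocks : List (Int × Int)), Dom_gen_edge_diag blocks → Spec_gen_edge_diag blocks (gen_edge_diag blocks)

-- ===== LEMMAS AND PROOFS =====

-- the unfiltered diagonal-candidate accumulator: adds every in-bounds non-block diagonal neighbour
def pvDallStep (blocks : List (Int × Int)) (d : PySem.Set (Int × Int)) (coord : Int × Int) :
    PySem.Set (Int × Int) :=
  (pvDiag coord).foldl
    (fun d pt => if !blocks.contains pt && pvInb pt then PySem.Set.add d pt else d) d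

theorem pv_contains_add (e : PySem.Set (Int × Int)) (pt q : Int × Int) :
    (PySem.Set.add e pt).contains q = (e.contains q || q == pt) := by
  by_cases h : q = pt
  · subst h
    by_cases hc : q ∈ e <;> simp [PySem.Set.add, hc]
  · by_cases hc : pt ∈ e <;> simp [PySem.Set.add, hc, h]

theorem pv_filter_set_add (s : List (Int × Int)) (x : Int × Int) (p : Int × Int → Bool) :
    (PySem.Set.add s x).filter p
      = if p x then PySem.Set.add (s.filter p) x else s.filter p := by
  by_cases hc : x ∈ s
  · have hadd : PySem.Set.add s x = s := PySem.Set.add_of_mem hc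
    by_cases hp : p x
    · have : x ∈ s.filter p := List.mem_filter.2 ⟨hc, hp⟩
      simp [hadd, hp, PySem.Set.add_of_mem this]
    · simp [hadd, hp]
  · have hadd : PySem.Set.add s x = s ++ [x] := PySem.Set.add_of_not_mem hc
    by_cases hp : p x
    · have : x ∉ s.filter p := fun h => hc (List.mem_filter.1 h).1
      simp [hadd, hp, List.filter_append, PySem.Set.add_of_not_mem this]
    · simp [hadd, hp, List.filter_append]

theorem pv_filter_discard (D : List (Int × Int)) (e : PySem.Set (Int × Int)) (pt : Int × Int) :
    PySem.Set.discard (D.filter (fun q => !e.contains q)) pt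
      = D.filter (fun q => !(PySem.Set.add e pt).contains q) := by
  simp only [PySem.Set.discard, List.filter_filter]
  apply List.filter_congr
  intro a _
  rw [pv_contains_add]
  by_cases hq : a = pt <;> by_cases he : a ∈ e <;> simp [hq, he]

-- A's inner edge loop on the pair state equals B's edge pass, with diag kept filtered by the current edge
theorem pv_A_edgeloop (blocks : List (Int × Int)) (cands : List (Int × Int)) :
    ∀ (e D : PySem.Set (Int × Int)),
      cands.foldl
        (fun (st : PySem.Set (Int × Int) × PySem.Set (Int × Int)) pt =>
          if blocks.contains pt then st
          else if pvInb pt then (PySem.Set.add st.1 pt, PySem.Set.discard st.2 pt)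
          else st)
        (e, D.filter (fun q => !e.contains q))
      = (cands.foldl (fun e pt => if !blocks.contains pt && pvInb pt then PySem.Set.add e pt else e) e,
         D.filter (fun q =>
           !(cands.foldl (fun e pt => if !blocks.contains pt && pvInb pt then PySem.Set.add e pt else e) e).contains q)) := by
  induction cands with
  | nil => intro e D; rfl
  | cons c cs ih =>
      intro e D
      by_cases hb : blocks.contains c
      · simp only [List.foldl_cons, hb, if_true, Bool.not_true, Bool.false_and, if_false]
        exact ih e D
      · by_cases hi : pvInb c
        · simp only [List.foldl_cons, hb, hi, if_true, if_false, Bool.not_false, Bool.true_and]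
          rw [pv_filter_discard]
          exact ih (PySem.Set.add e c) D
        · simp only [List.foldl_cons, hb, hi, if_false, Bool.not_false, Bool.true_and]
          exact ih e D
  
-- A's inner diag loop, started from a filtered accumulator, equals the unfiltered accumulator filtered afterwards
theorem pv_A_diagloop (blocks : List (Int × Int)) (e : PySem.Set (Int × Int))
    (cands : List (Int × Int)) :
    ∀ (D : PySem.Set (Int × Int)),
      cands.foldl
        (fun (d : PySem.Set (Int × Int)) pt =>
          if blocks.contains pt || e.contains pt then d
          else if pvInb pt then PySem.Set.add d pt
          else d)
        (D.filter (fun q => !e.contains q))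
      = (cands.foldl (fun d pt => if !blocks.contains pt && pvInb pt then PySem.Set.add d pt else d) D).filter
          (fun q => !e.contains q) := by
  induction cands with
  | nil => intro D; rfl
  | cons c cs ih =>
      intro D
      by_cases hb : blocks.contains c
      · simp only [List.foldl_cons, hb, Bool.true_or, if_true, Bool.not_true, Bool.false_and, if_false]
        exact ih D
      · by_cases hi : pvInb c
        · by_cases he : e.contains c
          · have hfd : List.filter (fun q => !e.contains q) D
                = List.filter (fun q => !e.contains q) (PySem.Set.add D c) := by
              have he' : c ∈ e := by simpa using he
              rw [pv_filter_set_add]; simp [he']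
            simp only [List.foldl_cons, hb, he, Bool.false_or, Bool.not_true, Bool.false_and,
              Bool.not_false, Bool.true_and, if_true, hi]
            rw [hfd]
            exact ih (PySem.Set.add D c)
          · have hfd : PySem.Set.add (List.filter (fun q => !e.contains q) D) c
                = List.filter (fun q => !e.contains q) (PySem.Set.add D c) := by
              have he' : c ∉ e := by simpa using he
              rw [pv_filter_set_add]; simp [he']
            simp only [List.foldl_cons, hb, he, Bool.false_or, Bool.not_false, Bool.true_and,
              if_false, if_true, hi]
            rw [hfd]
            exact ih (PySem.Set.add D c)
        · simp only [List.foldl_cons, hb, hi, Bool.false_or, Bool.not_false, Bool.true_and, if_false]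
          by_cases he : e.contains c <;> simp only [he, if_true, if_false] <;> exact ih D

-- B's diag pass, started from a filtered accumulator, is the same filtering done afterwards
theorem pv_B_diagloop (blocks : List (Int × Int)) (e : PySem.Set (Int × Int))
    (cands : List (Int × Int)) :
    ∀ (D : PySem.Set (Int × Int)),
      cands.foldl
        (fun d pt =>
          if !blocks.contains pt && (!e.contains pt && pvInb pt) then PySem.Set.add d pt else d)
        (D.filter (fun q => !e.contains q))
      = (cands.foldl (fun d pt => if !blocks.contains pt && pvInb pt then PySem.Set.add d pt else d) D).filter
          (fun q => !e.contains q) := by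
  induction cands with
  | nil => intro D; rfl
  | cons c cs ih =>
      intro D
      by_cases hb : blocks.contains c
      · simp only [List.foldl_cons, hb, Bool.not_true, Bool.false_and, if_false]
        exact ih D
      · by_cases hi : pvInb c
        · by_cases he : e.contains c
          · have hfd : List.filter (fun q => !e.contains q) D
                = List.filter (fun q => !e.contains q) (PySem.Set.add D c) := by
              have he' : c ∈ e := by simpa using he
              rw [pv_filter_set_add]; simp [he']
            simp only [List.foldl_cons, hb, he, hi, Bool.not_true, Bool.not_false, Bool.true_and,
              Bool.false_and, Bool.and_true, if_false, if_true]
            rw [hfd]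
            exact ih (PySem.Set.add D c)
          · have hfd : PySem.Set.add (List.filter (fun q => !e.contains q) D) c
                = List.filter (fun q => !e.contains q) (PySem.Set.add D c) := by
              have he' : c ∉ e := by simpa using he
              rw [pv_filter_set_add]; simp [he']
            simp only [List.foldl_cons, hb, he, hi, Bool.not_false, Bool.true_and, Bool.and_true,
              if_true]
            rw [hfd]
            exact ih (PySem.Set.add D c)
        · simp only [List.foldl_cons, hb, hi, Bool.not_false, Bool.true_and, Bool.and_false, if_false]
          exact ih D

-- main invariant: A's outer fold = (B's edge fold, unfiltered diag candidates filtered by the final edge)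
theorem pv_mainfold (blocks : List (Int × Int)) (bs : List (Int × Int)) :
    ∀ (e D : PySem.Set (Int × Int)),
      bs.foldl (pvAStep blocks) (e, D.filter (fun q => !e.contains q))
        = (bs.foldl (pvBEdgeStep blocks) e,
           (bs.foldl (pvDallStep blocks) D).filter
             (fun q => !(bs.foldl (pvBEdgeStep blocks) e).contains q)) := by
  induction bs with
  | nil => intro e D; rfl
  | cons c cs ih =>
      intro e D
      have hstep : pvAStep blocks (e, D.filter (fun q => !e.contains q)) c
          = (pvBEdgeStep blocks e c,
             (pvDallStep blocks D c).filter (fun q => !(pvBEdgeStep blocks e c).contains q)) := by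
        unfold pvAStep pvBEdgeStep pvDallStep
        rw [pv_A_edgeloop]
        exact congrArg _ (pv_A_diagloop blocks _ (pvDiag c) D)
      simp only [List.foldl_cons, hstep]
      exact ih (pvBEdgeStep blocks e c) (pvDallStep blocks D c)

-- B's diag pass over all blocks equals the unfiltered candidates filtered by the final edge
theorem pv_B_outer (blocks : List (Int × Int)) (e : PySem.Set (Int × Int)) (bs : List (Int × Int)) :
    ∀ (D : PySem.Set (Int × Int)),
      bs.foldl (pvBDiagStep blocks e) (D.filter (fun q => !e.contains q))
        = (bs.foldl (pvDallStep blocks) D).filter (fun q => !e.contains q) := by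
  induction bs with
  | nil => intro D; rfl
  | cons c cs ih =>
      intro D
      have hstep : pvBDiagStep blocks e (D.filter (fun q => !e.contains q)) c
          = (pvDallStep blocks D c).filter (fun q => !e.contains q) := by
        unfold pvBDiagStep pvDallStep
        exact pv_B_diagloop blocks e (pvDiag c) D
      simp only [List.foldl_cons, hstep]
      exact ih (pvDallStep blocks D c)

-- ===== VERDICT (by name: the statement is the Claim_ definition above) =====
theorem gen_edge_diag_spec : Claim_equal_gen_edge_diag := by
  intro blocks _
  unfold Spec_gen_edge_diag gen_edge_diag gen_edge_diag_alt
  have h0 : (PySem.Set.empty : PySem.Set (Int × Int))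
      = (PySem.Set.empty : PySem.Set (Int × Int)).filter
          (fun q => !(PySem.Set.empty : PySem.Set (Int × Int)).contains q) := rfl
  rw [show ((PySem.Set.empty, PySem.Set.empty) :
        PySem.Set (Int × Int) × PySem.Set (Int × Int))
      = (PySem.Set.empty,
         (PySem.Set.empty : PySem.Set (Int × Int)).filter
           (fun q => !(PySem.Set.empty : PySem.Set (Int × Int)).contains q)) from by rw [← h0]]
  rw [pv_mainfold blocks blocks PySem.Set.empty PySem.Set.empty]
  rw [← pv_B_outer blocks (blocks.foldl (pvBEdgeStep blocks) PySem.Set.empty) blocks PySem.Set.empty]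
  rfl
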